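-- pv_equiv track=rewrite | github.com/miliar/Code_Jam_Webscraper | solutions_python/Problem_179/3672.py | asBase
-- ===== SOURCE A (Python) =====
-- def asBase(dual, base):
--
--     if base == 2:
--         return dual
--
--     x = 0
--     b = 1
--     while dual != 0:
--         x += (dual & 1) * b
--         b *= base
--         dual = dual >> 1
--     return x
-- ===== SOURCE B (Python) =====
-- def asBase(dual, base):
--     if base == 2:
--         return dual
--     acc = 0
--     for c in bin(dual)[2:]:
--         acc = acc * base + (c == '1')
--     return acc
-- ===== Notes on version B (the rewrite author's own statement) =====
-- stated objective: alternative
-- what changed: Replaces the LSB-first loop maintaining a running power of the base with an MSB-first Horner fold over the digit string bin(dual)[2:], keeping only one accumulator.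
import Mathlib
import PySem

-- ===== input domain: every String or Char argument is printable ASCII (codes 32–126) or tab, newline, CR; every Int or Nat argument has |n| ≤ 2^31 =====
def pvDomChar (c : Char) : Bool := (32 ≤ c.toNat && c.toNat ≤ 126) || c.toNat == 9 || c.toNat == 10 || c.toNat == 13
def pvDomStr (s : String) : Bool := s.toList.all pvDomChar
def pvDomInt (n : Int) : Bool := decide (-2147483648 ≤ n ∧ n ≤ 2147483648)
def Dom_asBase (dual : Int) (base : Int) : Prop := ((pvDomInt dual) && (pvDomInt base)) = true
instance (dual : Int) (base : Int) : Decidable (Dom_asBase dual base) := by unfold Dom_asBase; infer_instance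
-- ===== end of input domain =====

-- B replaces A's LSB-first loop (running power of base) by an MSB-first Horner fold
-- over the binary digit string; objective: alternative decomposition, same cost.

-- ===== PORT A =====
-- A's while loop; the Nat fuel only makes the loop total (for 0 ≤ dual, |dual|+1 exceeds
-- the iteration count, so the fuel never runs out on Pre_; 'dual & 1' = mod 2, 'dual >> 1' = floordiv 2).
def asBaseLoop (base : Int) : Nat → Int → Int → Int → Int
  | 0, _, x, _ => x
  | fuel + 1, dual, x, b =>
    if dual ≠ 0 then
      asBaseLoop base fuel (PySem.Int.floordiv dual 2) (x + PySem.Int.mod dual 2 * b) (b * base)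
    else x

def asBase (dual : Int) (base : Int) : Int :=
  if base = 2 then dual
  else asBaseLoop base (dual.natAbs + 1) dual 0 1

-- ===== PORT B =====
-- bin(n)[2:] for n > 0, MSB first (empty for 0; Source B's bin(0)[2:] = "0" is handled at the call site)
def pvBinChars : Nat → List Char
  | 0 => []
  | n + 1 => pvBinChars ((n + 1) / 2) ++ [if (n + 1) % 2 = 1 then '1' else '0']

def asBase_alt (dual : Int) (base : Int) : Int :=
  if base = 2 then dual
  else
    (if dual = 0 then ['0'] else pvBinChars dual.toNat).foldl
      (fun acc c => acc * base + (if c = '1' then 1 else 0)) 0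

-- ===== PRECONDITION & SPEC =====
-- Pre_ excludes negative dual with base ≠ 2: there A's while loop never terminates
-- (dual >> 1 converges to -1), so A returns no value.
def Pre_asBase (dual : Int) (base : Int) : Prop := 0 ≤ dual ∨ base = 2
instance (dual : Int) (base : Int) : Decidable (Pre_asBase dual base) := by unfold Pre_asBase; infer_instance
def pvWitness_asBase : Int × Int := (13, 5)

def Spec_asBase (dual : Int) (base : Int) (out : Int) : Prop := out = asBase_alt dual base
instance (dual : Int) (base : Int) (out : Int) : Decidable (Spec_asBase dual base out) := by unfold Spec_asBase; infer_instance

-- ===== CLAIM (what is proved, stated in full; the proofs are below) =====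
def Claim_equal_asBase : Prop := ∀ (dual : Int) (base : Int), Dom_asBase dual base → Pre_asBase dual base → Spec_asBase dual base (asBase dual base)

-- ===== LEMMAS AND PROOFS =====

-- the common value: H base n = value of n's binary digits read in base `base`
def pvH (base : Int) : Nat → Int
  | 0 => 0
  | n + 1 => base * pvH base ((n + 1) / 2) + ((n + 1) % 2 : Nat)
decreasing_by exact Nat.div_lt_self (Nat.succ_pos n) one_lt_two

lemma pvH_pos (base : Int) (n : Nat) (h : n ≠ 0) :
    pvH base n = base * pvH base (n / 2) + ((n % 2 : Nat) : Int) := by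
  cases n with
  | zero => exact absurd rfl h
  | succ m => rw [pvH]

lemma foldl_pvBin (base : Int) (n : Nat) :
    (pvBinChars n).foldl (fun acc c => acc * base + (if c = '1' then 1 else 0)) 0 = pvH base n := by
  induction n using Nat.strong_induction_on with
  | _ n ih =>
    cases n with
    | zero => simp [pvBinChars, pvH]
    | succ m =>
      rw [pvBinChars, List.foldl_append, ih ((m + 1) / 2) (Nat.div_lt_self (Nat.succ_pos m) one_lt_two)]
      rw [pvH]
      rcases Nat.mod_two_eq_zero_or_one (m + 1) with h | h <;> simp [h]
      · ring
      · ring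

lemma loop_eq (base : Int) (fuel n : Nat) (x b : Int) (h : n < fuel) :
    asBaseLoop base fuel (n : Int) x b = x + b * pvH base n := by
  induction fuel generalizing n x b with
  | zero => omega
  | succ f ih =>
    rw [asBaseLoop]
    by_cases hn : (n : Int) = 0
    · have : n = 0 := by exact_mod_cast hn
      simp [this, pvH]
    · have hn0 : n ≠ 0 := by exact_mod_cast hn
      have hfd : PySem.Int.floordiv (n : Int) 2 = ((n / 2 : Nat) : Int) := by
        exact_mod_cast PySem.Int.floordiv_natCast n 2
      have hmd : PySem.Int.mod (n : Int) 2 = ((n % 2 : Nat) : Int) := by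
        exact_mod_cast PySem.Int.mod_natCast n 2
      rw [if_pos hn] at *
      rw [hfd, hmd]
      rw [ih (n / 2) _ _ (by omega)]
      rw [pvH_pos base n hn0]
      ring

-- ===== VERDICT (by name: the statement is the Claim_ definition above) =====
theorem asBase_spec : Claim_equal_asBase := by
  intro dual base _ hpre
  unfold Spec_asBase asBase asBase_alt
  by_cases hb : base = 2
  · simp [hb]
  · have hd : 0 ≤ dual := hpre.resolve_right hb
    obtain ⟨n, rfl⟩ : ∃ n : Nat, dual = (n : Int) := ⟨dual.toNat, (Int.toNat_of_nonneg hd).symm⟩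
    rw [if_neg hb, if_neg hb]
    have hfuel : n < (n : Int).natAbs + 1 := by simp
    rw [loop_eq base _ n 0 1 hfuel]
    by_cases h0 : (n : Int) = 0
    · have : n = 0 := by exact_mod_cast h0
      simp [this, pvH]
    · rw [if_neg h0]
      have : (n : Int).toNat = n := by simp
      rw [this, foldl_pvBin]
      ring
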